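-- pv_equiv track=rewrite | github.com/jonathonreilly/toy-physics | scripts/frontier_s3_shellability.py | check_vertex_links
-- ===== SOURCE A (Python) =====
-- from collections import defaultdict, deque
-- from itertools import combinations
--
-- def check_vertex_links(tets: list[tuple]) -> tuple[bool, int]:
--     """Check all vertex links are S^2. Returns (all_ok, n_checked)."""
--     verts = set()
--     for tet in tets:
--         verts.update(tet)
--
--     n_checked = 0
--     all_ok = True
--     for v in verts:
--         link_tris = []
--         for tet in tets:
--             if v in tet:
--                 opposite = tuple(vi for vi in tet if vi != v)
--                 link_tris.append(tuple(sorted(opposite)))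
--
--         link_verts = set()
--         link_edges = set()
--         for tri in link_tris:
--             link_verts.update(tri)
--             for a, b in combinations(tri, 2):
--                 link_edges.add((min(a, b), max(a, b)))
--
--         V = len(link_verts)
--         E = len(link_edges)
--         F = len(link_tris)
--         chi = V - E + F
--
--         # Check closed
--         edge_tri_count = defaultdict(int)
--         for tri in link_tris:
--             for a, b in combinations(tri, 2):
--                 edge_tri_count[(min(a, b), max(a, b))] += 1
--         boundary_edges = sum(1 for c in edge_tri_count.values() if c != 2)
--
--         if chi != 2 or boundary_edges > 0:
--             all_ok = False
--         n_checked += 1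
--
--     return all_ok, n_checked
-- ===== SOURCE B (Python) =====
-- from collections import Counter
-- from itertools import combinations
--
-- def check_vertex_links(tets):
--     """Check all vertex links are S^2. Returns (all_ok, n_checked)."""
--     pairs = [(v, tuple(sorted(vi for vi in tet if vi != v)))
--              for tet in tets for v in dict.fromkeys(tet)]
--     tris_by_vertex = {}
--     for v, tri in pairs:
--         tris_by_vertex.setdefault(v, []).append(tri)
--
--     def link_ok(link_tris):
--         edges = [(min(a, b), max(a, b))
--                  for tri in link_tris for a, b in combinations(tri, 2)]
--         counts = Counter(edges)
--         V = len({u for tri in link_tris for u in tri})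
--         chi = V - len(counts) + len(link_tris)
--         return chi == 2 and all(c == 2 for c in counts.values())
--
--     return all(map(link_ok, tris_by_vertex.values())), len(tris_by_vertex)
-- ===== Notes on version B (the rewrite author's own statement) =====
-- stated objective: faster
-- what changed: B builds the vertex->link-triangles index in one pass over the tetrahedra (instead of rescanning all tets for every vertex) and checks each link with a single Counter over its edges, deriving E, the edge set and the closedness test from that one counter.
import Mathlib
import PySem

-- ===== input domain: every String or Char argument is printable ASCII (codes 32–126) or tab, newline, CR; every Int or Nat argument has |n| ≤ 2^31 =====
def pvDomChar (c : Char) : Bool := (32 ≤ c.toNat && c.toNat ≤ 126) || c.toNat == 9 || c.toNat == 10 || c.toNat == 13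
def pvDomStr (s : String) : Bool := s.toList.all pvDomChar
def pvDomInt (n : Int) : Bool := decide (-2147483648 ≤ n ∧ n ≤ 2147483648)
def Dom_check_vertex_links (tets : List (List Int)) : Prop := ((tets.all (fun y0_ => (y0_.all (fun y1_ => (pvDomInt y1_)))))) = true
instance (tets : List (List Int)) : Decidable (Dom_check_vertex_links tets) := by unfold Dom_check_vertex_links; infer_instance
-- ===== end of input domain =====

-- B replaces A's per-vertex rescan of all tets by one grouping pass over the tets
-- and one Counter per link (objective: faster, asymptotically fewer tet scans).

-- itertools.combinations(xs, 2) with tuple unpacking, in CPython's order (exact).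
def combos2 : List Int → List (Int × Int)
  | [] => []
  | x :: xs => xs.map (fun y => (x, y)) ++ combos2 xs

-- ===== PORT A =====
def check_vertex_links (tets : List (List Int)) : Bool × Int :=
  let verts : PySem.Set Int := tets.foldl (fun s tet => PySem.Set.update s tet) PySem.Set.empty
  let st := verts.foldl (fun (st : Int × Bool) v =>
    let link_tris : List (List Int) := tets.foldl (fun acc tet =>
      if tet.contains v then
        acc ++ [PySem.List.sorted (tet.filter (fun vi => vi ≠ v)) (fun x => x) false]
      else acc) []
    let link_verts : PySem.Set Int := link_tris.foldl (fun s tri => PySem.Set.update s tri) PySem.Set.empty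
    let link_edges : PySem.Set (Int × Int) := link_tris.foldl (fun s tri =>
      (combos2 tri).foldl (fun s p => PySem.Set.add s (min p.1 p.2, max p.1 p.2)) s) PySem.Set.empty
    let V : Int := PySem.Set.len link_verts
    let E : Int := PySem.Set.len link_edges
    let F : Int := PySem.List.len link_tris
    let chi : Int := V - E + F
    let edge_tri_count : PySem.Dict (Int × Int) Int := link_tris.foldl (fun d tri =>
      (combos2 tri).foldl (fun d p => d.modify (min p.1 p.2, max p.1 p.2) 0 (· + 1)) d) PySem.Dict.empty
    let boundary_edges : Int := (edge_tri_count.values.filter (fun c => c ≠ 2)).length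
    let all_ok : Bool := if chi ≠ 2 ∨ boundary_edges > 0 then false else st.2
    (st.1 + 1, all_ok)) ((0 : Int), true)
  (st.2, st.1)

-- ===== PORT B =====
def link_ok (link_tris : List (List Int)) : Bool :=
  let edges : List (Int × Int) :=
    link_tris.flatMap (fun tri => (combos2 tri).map (fun p => (min p.1 p.2, max p.1 p.2)))
  let counts : PySem.Dict (Int × Int) Int := PySem.Dict.counter edges
  let V : Int := PySem.Set.len (PySem.Set.ofList (link_tris.flatMap (fun tri => tri)))
  let chi : Int := V - counts.size + PySem.List.len link_tris
  decide (chi = 2) && counts.values.all (fun c => c == 2)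

def check_vertex_links_alt (tets : List (List Int)) : Bool × Int :=
  let pairs : List (Int × List Int) :=
    tets.flatMap (fun tet => (PySem.List.dedup tet).map (fun v =>
      (v, PySem.List.sorted (tet.filter (fun vi => vi ≠ v)) (fun x => x) false)))
  let tris_by_vertex : PySem.Dict Int (List (List Int)) :=
    pairs.foldl (fun d p => d.modify p.1 [] (· ++ [p.2])) PySem.Dict.empty
  (tris_by_vertex.values.all link_ok, tris_by_vertex.size)

-- ===== PRECONDITION & SPEC =====
def Spec_check_vertex_links (tets : List (List Int)) (out : Bool × Int) : Prop := out = check_vertex_links_alt tets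
instance (tets : List (List Int)) (out : Bool × Int) : Decidable (Spec_check_vertex_links tets out) := by unfold Spec_check_vertex_links; infer_instance

-- ===== CLAIM (what is proved, stated in full; the proofs are below) =====
def Claim_equal_check_vertex_links : Prop := ∀ (tets : List (List Int)), Dom_check_vertex_links tets → Spec_check_vertex_links tets (check_vertex_links tets)

-- ===== LEMMAS AND PROOFS =====

-- proof-side abbreviations (not used by the ports or the claim)
def triOf (tet : List Int) (v : Int) : List Int :=
  PySem.List.sorted (tet.filter (fun vi => vi ≠ v)) (fun x => x) false

def normE (p : Int × Int) : Int × Int := (min p.1 p.2, max p.1 p.2)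

def linkTris (tets : List (List Int)) (v : Int) : List (List Int) :=
  (tets.filter (fun tet => tet.contains v)).map (fun tet => triOf tet v)

def linkEdges (L : List (List Int)) : List (Int × Int) :=
  L.flatMap (fun tri => (combos2 tri).map normE)

-- a fold over a flatMap is the nested fold
theorem foldl_flatMap {α β σ : Type} (g : α → List β) (f : σ → β → σ) :
    ∀ (l : List α) (s : σ), (l.flatMap g).foldl f s = l.foldl (fun s x => (g x).foldl f s) s
  | [], _ => rfl
  | x :: l, s => by
    simp only [List.flatMap_cons, List.foldl_append, List.foldl_cons]
    exact foldl_flatMap g f l _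

theorem set_update_eq_foldl {α : Type} [BEq α] (s : PySem.Set α) (xs : List α) :
    PySem.Set.update s xs = xs.foldl PySem.Set.add s := rfl

theorem set_update_dedup {α : Type} [BEq α] [LawfulBEq α] (s : PySem.Set α) (l : List α) :
    PySem.Set.update s (PySem.List.dedup l) = PySem.Set.update s l := by
  rw [PySem.List.dedup_eq_ofList, PySem.Set.update_eq_append_filter,
    PySem.Set.update_eq_append_filter, PySem.Set.ofList_ofList]

theorem filter_beq_of_nodup {α : Type} [DecidableEq α] (v : α) :
    ∀ (l : List α), l.Nodup → l.filter (fun u => u == v) = if v ∈ l then [v] else []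
  | [], _ => by simp
  | x :: l, h => by
    rw [List.nodup_cons] at h
    rw [List.filter_cons, filter_beq_of_nodup v l h.2]
    by_cases hx : x = v
    · subst hx
      simp [h.1]
    · simp only [beq_iff_eq, hx, List.mem_cons]
      by_cases hv : v ∈ l <;> simp [hv, Ne.symm hx]

-- A's vertex set equals the first-occurrence list of keys B inserts
theorem verts_eq (tets : List (List Int)) :
    tets.foldl (fun s tet => PySem.Set.update s tet) PySem.Set.empty
      = PySem.Set.ofList (tets.flatMap (fun tet => PySem.List.dedup tet)) := by
  rw [PySem.Set.ofList_eq_foldl, foldl_flatMap]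
  apply PySem.List.foldl_congr_mem
  intro acc x _
  rw [← set_update_eq_foldl, set_update_dedup]

-- A's per-vertex scan, as filter+map
theorem linkTris_eq_foldl (tets : List (List Int)) (v : Int) :
    tets.foldl (fun acc tet =>
      if tet.contains v then acc ++ [PySem.List.sorted (tet.filter (fun vi => vi ≠ v)) (fun x => x) false]
      else acc) [] = linkTris tets v := by
  rw [PySem.List.foldl_append_if]
  rfl

-- B's grouped value at key v is exactly A's per-vertex scan
theorem pairs_filter_eq (tets : List (List Int)) (v : Int) :
    (((tets.flatMap (fun tet => (PySem.List.dedup tet).map (fun u =>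
        (u, PySem.List.sorted (tet.filter (fun vi => vi ≠ u)) (fun x => x) false)))).filter
      (fun p => p.1 == v)).map (·.2)) = linkTris tets v := by
  induction tets with
  | nil => rfl
  | cons tet tets ih =>
    rw [List.flatMap_cons, List.filter_append, List.map_append, ih]
    rw [List.filter_map]
    rw [show ((fun (p : Int × List Int) => p.1 == v) ∘ (fun u =>
      (u, PySem.List.sorted (tet.filter (fun vi => vi ≠ u)) (fun x => x) false))) = (fun u => u == v) from rfl]
    rw [filter_beq_of_nodup v _ (PySem.List.nodup_dedup tet)]
    by_cases hv : v ∈ tet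
    · simp [hv, linkTris, triOf]
    · simp [hv, linkTris, triOf]

-- per-link pieces --------------------------------------------------------

theorem link_verts_eq (L : List (List Int)) :
    L.foldl (fun s tri => PySem.Set.update s tri) PySem.Set.empty
      = PySem.Set.ofList (L.flatMap (fun tri => tri)) := by
  rw [PySem.Set.ofList_eq_foldl, foldl_flatMap]
  apply PySem.List.foldl_congr_mem
  intro acc x _
  rw [← set_update_eq_foldl]

theorem link_edge_set_eq (L : List (List Int)) :
    L.foldl (fun s tri =>
      (combos2 tri).foldl (fun s p => PySem.Set.add s (min p.1 p.2, max p.1 p.2)) s) PySem.Set.empty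
      = PySem.Set.ofList (linkEdges L) := by
  rw [PySem.Set.ofList_eq_foldl, linkEdges, foldl_flatMap]
  apply PySem.List.foldl_congr_mem
  intro acc x _
  rw [List.foldl_map]
  rfl

theorem edge_count_eq (L : List (List Int)) :
    L.foldl (fun d tri =>
      (combos2 tri).foldl (fun d p => d.modify (min p.1 p.2, max p.1 p.2) 0 (· + 1)) d) PySem.Dict.empty
      = PySem.Dict.counter (linkEdges L) := by
  rw [PySem.Dict.counter_eq_foldl, linkEdges, foldl_flatMap]
  apply PySem.List.foldl_congr_mem
  intro acc x _
  rw [List.foldl_map]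
  rfl

theorem boundary_all_eq (vs : List Int) :
    (!decide (((vs.filter (fun c => c ≠ 2)).length : Int) > 0)) = vs.all (fun c => c == 2) := by
  induction vs with
  | nil => rfl
  | cons c vs ih =>
    by_cases hc : c = 2
    · simpa [hc] using ih
    · simp [hc]

theorem bool_combine (p : Prop) [Decidable p] (vs : List Int) :
    (!decide (¬p ∨ ((vs.filter (fun c => c ≠ 2)).length : Int) > 0))
      = (decide p && vs.all (fun c => c == 2)) := by
  by_cases h : p
  · simp only [h, not_true_eq_false, false_or, decide_true, Bool.true_and]
    exact boundary_all_eq vs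
  · simp [h]

-- A's per-vertex verdict equals B's link_ok, on the same triangle list
theorem okA_eq_link_ok (L : List (List Int)) :
    (!decide ((PySem.Set.len (L.foldl (fun s tri => PySem.Set.update s tri) PySem.Set.empty)
        - PySem.Set.len (L.foldl (fun s tri =>
            (combos2 tri).foldl (fun s p => PySem.Set.add s (min p.1 p.2, max p.1 p.2)) s) PySem.Set.empty)
        + PySem.List.len L ≠ 2)
      ∨ ((((L.foldl (fun d tri =>
            (combos2 tri).foldl (fun d p => d.modify (min p.1 p.2, max p.1 p.2) 0 (· + 1)) d)
            PySem.Dict.empty : PySem.Dict (Int × Int) Int)).values.filter (fun c => c ≠ 2)).length : Int) > 0))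
      = link_ok L := by
  rw [link_verts_eq, link_edge_set_eq, edge_count_eq]
  have hE : PySem.Set.len (PySem.Set.ofList (linkEdges L)) = (PySem.Dict.counter (linkEdges L)).size := by
    show (((PySem.Set.ofList (linkEdges L)).length : Int))
        = (((PySem.Dict.counter (linkEdges L)).items.length : Int))
    rw [← PySem.Dict.keys_counter, show (PySem.Dict.counter (linkEdges L)).keys
        = (PySem.Dict.counter (linkEdges L)).items.map (·.1) from rfl, List.length_map]
  have hlo : link_ok L = (decide ((PySem.Set.len (PySem.Set.ofList (L.flatMap (fun tri => tri)))
      - (PySem.Dict.counter (linkEdges L)).size + PySem.List.len L) = 2)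
      && (PySem.Dict.counter (linkEdges L)).values.all (fun c => c == 2)) := rfl
  rw [hlo, ← hE]
  exact bool_combine _ _

-- A's driver loop, resolved
theorem foldl_count_flag {α : Type} (c : α → Bool) :
    ∀ (l : List α) (n : Int) (b : Bool),
      l.foldl (fun (st : Int × Bool) v => (st.1 + 1, st.2 && c v)) (n, b)
        = (n + l.length, b && l.all c)
  | [], n, b => by simp
  | x :: l, n, b => by
    simp only [List.foldl_cons, foldl_count_flag c l, List.all_cons, List.length_cons, Prod.mk.injEq]
    refine ⟨by push_cast; ring, by rw [Bool.and_assoc]⟩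

-- ===== VERDICT (by name: the statement is the Claim_ definition above) =====
theorem check_vertex_links_spec : Claim_equal_check_vertex_links := by
  intro tets _
  unfold Spec_check_vertex_links
  have hA : check_vertex_links tets
      = ((PySem.Set.ofList (tets.flatMap (fun tet => PySem.List.dedup tet))).all
           (fun v => link_ok (linkTris tets v)),
         ((PySem.Set.ofList (tets.flatMap (fun tet => PySem.List.dedup tet))).length : Int)) := by
    simp only [check_vertex_links]
    rw [verts_eq]
    have hst : (PySem.Set.ofList (tets.flatMap (fun tet => PySem.List.dedup tet))).foldl
        (fun (st : Int × Bool) v =>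
          (st.1 + 1,
            if PySem.Set.len ((tets.foldl (fun acc tet =>
                  if tet.contains v then acc ++ [PySem.List.sorted (tet.filter (fun vi => vi ≠ v)) (fun x => x) false]
                  else acc) []).foldl (fun s tri => PySem.Set.update s tri) PySem.Set.empty)
                - PySem.Set.len ((tets.foldl (fun acc tet =>
                    if tet.contains v then acc ++ [PySem.List.sorted (tet.filter (fun vi => vi ≠ v)) (fun x => x) false]
                    else acc) []).foldl (fun s tri =>
                      (combos2 tri).foldl (fun s p => PySem.Set.add s (min p.1 p.2, max p.1 p.2)) s) PySem.Set.empty)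
                + PySem.List.len (tets.foldl (fun acc tet =>
                    if tet.contains v then acc ++ [PySem.List.sorted (tet.filter (fun vi => vi ≠ v)) (fun x => x) false]
                    else acc) []) ≠ 2
              ∨ (((((tets.foldl (fun acc tet =>
                    if tet.contains v then acc ++ [PySem.List.sorted (tet.filter (fun vi => vi ≠ v)) (fun x => x) false]
                    else acc) []).foldl (fun d tri =>
                      (combos2 tri).foldl (fun d p => d.modify (min p.1 p.2, max p.1 p.2) 0 (· + 1)) d)
                      PySem.Dict.empty : PySem.Dict (Int × Int) Int)).values.filter (fun c => c ≠ 2)).length : Int) > 0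
            then false else st.2)) ((0 : Int), true)
        = ((0 : Int) + ((PySem.Set.ofList (tets.flatMap (fun tet => PySem.List.dedup tet))).length : Int),
           true && (PySem.Set.ofList (tets.flatMap (fun tet => PySem.List.dedup tet))).all
             (fun v => link_ok (linkTris tets v))) := by
      rw [← foldl_count_flag]
      apply PySem.List.foldl_congr_mem
      intro acc v _
      rw [linkTris_eq_foldl tets v, ← okA_eq_link_ok (linkTris tets v)]
      congr 1
      split
      next h => rw [decide_eq_true h]; simp
      next h => rw [decide_eq_false h]; simp
    rw [hst]
    simp
  have hnd : ((tets.flatMap (fun tet => (PySem.List.dedup tet).map (fun v =>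
      (v, PySem.List.sorted (tet.filter (fun vi => vi ≠ v)) (fun x => x) false)))).foldl
      (fun d p => d.modify p.1 [] (· ++ [p.2]))
      (PySem.Dict.empty : PySem.Dict Int (List (List Int)))).keys.Nodup := by
    apply PySem.Dict.nodup_keys_foldl_modify_key
    exact PySem.Dict.nodup_keys_empty
  have hkeys : ((tets.flatMap (fun tet => (PySem.List.dedup tet).map (fun v =>
      (v, PySem.List.sorted (tet.filter (fun vi => vi ≠ v)) (fun x => x) false)))).foldl
      (fun d p => d.modify p.1 [] (· ++ [p.2]))
      (PySem.Dict.empty : PySem.Dict Int (List (List Int)))).keys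
      = PySem.Set.ofList (tets.flatMap (fun tet => PySem.List.dedup tet)) := by
    rw [PySem.Dict.keys_foldl_modify_key (key := Prod.fst) (f := fun d p => (· ++ [p.2])) ..]
    rw [List.map_flatMap]
    simp [Function.comp_def]
    rfl
  have hB : check_vertex_links_alt tets
      = ((PySem.Set.ofList (tets.flatMap (fun tet => PySem.List.dedup tet))).all
           (fun v => link_ok (linkTris tets v)),
         ((PySem.Set.ofList (tets.flatMap (fun tet => PySem.List.dedup tet))).length : Int)) := by
    simp only [check_vertex_links_alt]
    set D := ((tets.flatMap (fun tet => (PySem.List.dedup tet).map (fun v =>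
      (v, PySem.List.sorted (tet.filter (fun vi => vi ≠ v)) (fun x => x) false)))).foldl
      (fun d p => d.modify p.1 [] (· ++ [p.2]))
      (PySem.Dict.empty : PySem.Dict Int (List (List Int)))) with hD
    have hgetD : ∀ k, D.getD k [] = linkTris tets k := by
      intro k
      rw [hD, PySem.Dict.getD_foldl_modify_append]
      simpa using pairs_filter_eq tets k
    have hvals : D.values = D.keys.map (fun k => D.getD k []) :=
      PySem.Dict.values_eq_map_keys D hnd []
    have hsize : D.size = (D.keys.length : Int) := by
      rw [show D.keys = D.items.map (·.1) from rfl, List.length_map]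
      rfl
    rw [hvals, hsize, hkeys, List.all_map]
    have hfun : (link_ok ∘ fun k => D.getD k []) = (fun v => link_ok (linkTris tets v)) := by
      funext k
      simp [hgetD k]
    rw [hfun]
  rw [hA, hB]
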